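-- pv_equiv track=rewrite | github.com/queelius/computational-explorations | src/extremal_coprime.py | cycle_spectrum_via_matrix
-- ===== SOURCE A (Python) =====
-- import math
-- from typing import Set, List, Dict, Any, Optional, Tuple
--
-- def cycle_spectrum_via_matrix(A: Set[int], max_length: int = 20) -> List[int]:
--     """
--     Find which cycle lengths exist in G(A) using adjacency matrix traces.
--
--     tr(A^k) counts closed walks of length k. For odd k, if tr(A^k) > 0
--     and no shorter odd cycle accounts for it, then a cycle of length k exists.
--
--     For precision: use DFS cycle detection for small graphs.
--     """
--     A_list = sorted(A)
--     n = len(A_list)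
--     if n < 3:
--         return []
--
--     # Build adjacency matrix
--     adj = [[0] * n for _ in range(n)]
--     for i in range(n):
--         for j in range(i + 1, n):
--             if math.gcd(A_list[i], A_list[j]) == 1:
--                 adj[i][j] = 1
--                 adj[j][i] = 1
--
--     cycle_lengths = []
--
--     # Check for cycles using DFS backtracking
--     for length in range(3, min(max_length + 1, n + 1), 2):  # odd only
--         if _has_cycle_of_length(adj, n, length):
--             cycle_lengths.append(length)
--
--     return cycle_lengths
--
-- def _has_cycle_of_length(adj: list, n: int, length: int) -> bool:
--     """Check if graph has a cycle of exact given length."""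
--     if n < length:
--         return False
--
--     for start in range(n):
--         visited = [False] * n
--         visited[start] = True
--         if _dfs_cycle(adj, n, start, start, visited, 1, length):
--             return True
--     return False
--
-- def _dfs_cycle(adj: list, n: int, start: int, current: int,
--                visited: list, depth: int, target: int) -> bool:
--     """DFS to find cycle returning to start at exact depth."""
--     if depth == target:
--         return adj[current][start] == 1
--
--     for next_v in range(n):
--         if adj[current][next_v] == 1 and not visited[next_v]:
--             visited[next_v] = True
--             if _dfs_cycle(adj, n, start, next_v, visited, depth + 1, target):
--                 return True
--             visited[next_v] = False
--
--     return False
-- ===== SOURCE B (Python) =====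
-- import math
--
-- def cycle_spectrum_via_matrix(A, max_length=20):
--     """Single length-collecting DFS: one backtracking traversal per start vertex
--     records every odd depth 3..min(max_length, n) at which a simple path closes
--     back to its start, instead of re-running a full DFS for each candidate length."""
--     verts = sorted(A)
--     n = len(verts)
--     bound = min(max_length, n)
--     adj = [[1 if i != j and math.gcd(verts[i], verts[j]) == 1 else 0
--             for j in range(n)] for i in range(n)]
--     found = set()
--
--     def extend(start, current, visited, depth):
--         if depth >= 3 and depth % 2 == 1 and adj[current][start] == 1:
--             found.add(depth)
--         if depth < bound:
--             for v in range(n):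
--                 if adj[current][v] == 1 and not visited[v]:
--                     visited[v] = True
--                     extend(start, v, visited, depth + 1)
--                     visited[v] = False
--
--     for start in range(n):
--         visited = [False] * n
--         visited[start] = True
--         extend(start, start, visited, 1)
--     return sorted(found)
-- ===== Notes on version B (the rewrite author's own statement) =====
-- stated objective: alternative
-- what changed: A re-runs an independent fixed-target boolean DFS over the whole graph for every odd candidate length; B runs one length-collecting backtracking DFS per start vertex that records every odd closing depth up to min(max_length, n) in a set and returns it sorted, and builds the adjacency matrix by comprehension instead of in-place symmetric updates (B trades A's per-length early exit for the single collecting pass, so it can be slower on dense graphs).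
import Mathlib
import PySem

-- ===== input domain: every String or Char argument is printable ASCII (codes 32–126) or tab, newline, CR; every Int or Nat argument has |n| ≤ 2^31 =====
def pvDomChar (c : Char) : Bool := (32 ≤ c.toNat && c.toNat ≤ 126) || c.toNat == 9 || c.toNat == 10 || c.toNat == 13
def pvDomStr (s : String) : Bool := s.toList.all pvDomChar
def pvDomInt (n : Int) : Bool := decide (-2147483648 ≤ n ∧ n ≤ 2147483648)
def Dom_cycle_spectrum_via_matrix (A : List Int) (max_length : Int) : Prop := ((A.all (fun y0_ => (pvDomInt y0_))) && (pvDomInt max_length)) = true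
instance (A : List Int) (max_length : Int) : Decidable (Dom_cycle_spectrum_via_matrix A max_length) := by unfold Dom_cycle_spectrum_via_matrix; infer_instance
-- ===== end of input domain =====

-- B replaces A's independent per-candidate-length DFS reruns by ONE length-collecting
-- backtracking DFS per start vertex (objective: alternative single-pass structure;
-- B's pass is exhaustive, it does not keep A's per-length early exit).

-- shared matrix-indexing helpers: adj[i][j] reads / adj[i][j] = v writes; all uses are in range,
-- so the getD/set transliteration is exact for the ports' accesses
def mget (m : List (List Int)) (i j : Nat) : Int := (m.getD i []).getD j 0

def set2 (m : List (List Int)) (i j : Nat) (v : Int) : List (List Int) :=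
  m.set i ((m.getD i []).set j v)

-- ===== PORT A =====
-- the double loop 'for i in range(n): for j in range(i+1, n): if gcd == 1: adj[i][j] = adj[j][i] = 1'
def buildA (xs : List Int) (n : Nat) : List (List Int) :=
  (List.range n).foldl (fun adj i =>
    (List.range' (i+1) (n - (i+1))).foldl (fun adj j =>
      if Int.gcd (xs.getD i 0) (xs.getD j 0) = 1 then set2 (set2 adj i j 1) j i 1 else adj) adj)
    (List.replicate n (List.replicate n 0))

-- _dfs_cycle; the 'target < depth' branch is a termination guard only (every call has depth ≤ target)
def dfsA (adj : List (List Int)) (n start current : Nat) (visited : List Bool) (depth target : Nat) : Bool :=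
  if depth = target then mget adj current start == 1
  else if target < depth then false
  else (List.range n).any (fun v =>
    if mget adj current v == 1 && !(visited.getD v false) then
      dfsA adj n start v (visited.set v true) (depth+1) target
    else false)
termination_by target - depth
decreasing_by omega

-- _has_cycle_of_length
def hasCycleA (adj : List (List Int)) (n length : Nat) : Bool :=
  if n < length then false
  else (List.range n).any (fun start =>
    dfsA adj n start start ((List.replicate n false).set start true) 1 length)

def cycle_spectrum_via_matrix (A : List Int) (max_length : Int) : List Int :=
  let A_list := PySem.List.sorted A (fun x => x)
  let n := A_list.length
  if n < 3 then []
  else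
    let adj := buildA A_list n
    (PySem.List.pyRange 3 (min (max_length + 1) ((n : Int) + 1)) 2).foldl
      (fun acc len => if hasCycleA adj n len.toNat then acc ++ [len] else acc) []

-- ===== PORT B =====
-- adjacency by comprehension: [[1 if i != j and gcd == 1 else 0 for j ...] for i ...]
def adjB (xs : List Int) (n : Nat) : List (List Int) :=
  (List.range n).map (fun i => (List.range n).map (fun j =>
    if i ≠ j ∧ Int.gcd (xs.getD i 0) (xs.getD j 0) = 1 then (1 : Int) else 0))

-- 'extend': one backtracking DFS collecting every odd closing depth 3..bound (returns the depths it adds)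
def collectB (adj : List (List Int)) (n start current : Nat) (visited : List Bool)
    (depth : Nat) (bound : Int) : List Int :=
  let here := if 3 ≤ depth ∧ depth % 2 = 1 ∧ mget adj current start == 1 then [(depth : Int)] else []
  if (depth : Int) < bound then
    here ++ (List.range n).flatMap (fun v =>
      if mget adj current v == 1 && !(visited.getD v false) then
        collectB adj n start v (visited.set v true) (depth+1) bound
      else [])
  else here
termination_by (bound - depth).toNat
decreasing_by omega

def cycle_spectrum_via_matrix_alt (A : List Int) (max_length : Int) : List Int :=
  let verts := PySem.List.sorted A (fun x => x)
  let n := verts.length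
  let bound := min max_length (n : Int)
  let adj := adjB verts n
  let found := PySem.Set.ofList ((List.range n).flatMap (fun s =>
    collectB adj n s s ((List.replicate n false).set s true) 1 bound))
  PySem.List.sorted found (fun x => x)

-- ===== PRECONDITION & SPEC =====
def Spec_cycle_spectrum_via_matrix (A : List Int) (max_length : Int) (out : List Int) : Prop := out = cycle_spectrum_via_matrix_alt A max_length
instance (A : List Int) (max_length : Int) (out : List Int) : Decidable (Spec_cycle_spectrum_via_matrix A max_length out) := by unfold Spec_cycle_spectrum_via_matrix; infer_instance

-- ===== CLAIM (what is proved, stated in full; the proofs are below) =====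
def Claim_equal_cycle_spectrum_via_matrix : Prop := ∀ (A : List Int) (max_length : Int), Dom_cycle_spectrum_via_matrix A max_length → Spec_cycle_spectrum_via_matrix A max_length (cycle_spectrum_via_matrix A max_length)

-- ===== LEMMAS AND PROOFS =====

def matShape (n : Nat) (m : List (List Int)) : Prop := m.length = n ∧ ∀ r ∈ m, r.length = n

def pairStep (xs : List Int) (adj : List (List Int)) (p : Nat × Nat) : List (List Int) :=
  if Int.gcd (xs.getD p.1 0) (xs.getD p.2 0) = 1 then set2 (set2 adj p.1 p.2 1) p.2 p.1 1 else adj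

def pairsN (n : Nat) : List (Nat × Nat) :=
  (List.range n).flatMap (fun i => (List.range' (i+1) (n - (i+1))).map (fun j => (i, j)))

theorem mem_pairsN (n : Nat) (p : Nat × Nat) : p ∈ pairsN n ↔ p.1 < p.2 ∧ p.2 < n := by
  obtain ⟨a, b⟩ := p
  simp only [pairsN, List.mem_flatMap, List.mem_map, List.mem_range, List.mem_range'_1,
    Prod.mk.injEq]
  constructor
  · rintro ⟨i, hi, j, hj, rfl, rfl⟩; omega
  · rintro ⟨h1, h2⟩; exact ⟨a, by omega, b, by omega, rfl, rfl⟩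

theorem buildA_eq_foldPairs (xs : List Int) (n : Nat) :
    buildA xs n = (pairsN n).foldl (pairStep xs) (List.replicate n (List.replicate n 0)) := by
  rw [buildA, pairsN, List.foldl_flatMap]
  simp only [List.foldl_map, pairStep]

theorem set2_shape (n : Nat) (m : List (List Int)) (i j : Nat) (v : Int) (h : matShape n m) :
    matShape n (set2 m i j v) := by
  obtain ⟨hl, hr⟩ := h
  rcases Nat.lt_or_ge i m.length with hi | hi
  · refine ⟨by simp [set2, hl], ?_⟩
    intro r hrm
    rcases List.mem_or_eq_of_mem_set hrm with h' | rfl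
    · exact hr r h'
    · rw [List.getD_eq_getElem _ _ hi]; simp [hr _ (List.getElem_mem hi)]
  · rw [set2, List.set_eq_of_length_le hi]; exact ⟨hl, hr⟩

theorem mget_set2 (n : Nat) (m : List (List Int)) (a b : Nat) (v : Int) (h : matShape n m)
    (ha : a < n) (hb : b < n) (i j : Nat) :
    mget (set2 m a b v) i j = if i = a ∧ j = b then v else mget m i j := by
  obtain ⟨hl, hr⟩ := h
  have ham : a < m.length := by omega
  have hrow : (m[a]?.getD []).length = n := by
    rw [← List.getD_eq_getElem?_getD, List.getD_eq_getElem _ _ ham]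
    exact hr _ (List.getElem_mem ham)
  simp only [mget, set2, List.getD_eq_getElem?_getD, List.getElem?_set]
  by_cases hia : a = i
  · subst hia
    by_cases hjb : b = j
    · subst hjb
      have hml : b < m[a].length := by rw [hr _ (List.getElem_mem ham)]; exact hb
      simp [ham, hml]
    · have : ¬ (a = a ∧ j = b) := fun hc => hjb hc.2.symm
      simp only [if_pos ham]
      simp [hjb]
      intro h; exact absurd h.symm hjb
  · have : ¬ (i = a ∧ j = b) := fun hc => hia hc.1.symm
    simp [hia, this]

theorem pairStep_shape (xs : List Int) (n : Nat) (m : List (List Int)) (p : Nat × Nat)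
    (hsh : matShape n m) : matShape n (pairStep xs m p) := by
  rw [pairStep]
  split
  · exact set2_shape n _ _ _ _ (set2_shape n _ _ _ _ hsh)
  · exact hsh

theorem foldPairs_shape (xs : List Int) (n : Nat) (ps : List (Nat × Nat)) (m : List (List Int))
    (hsh : matShape n m) : matShape n (ps.foldl (pairStep xs) m) := by
  induction ps generalizing m with
  | nil => exact hsh
  | cons p t ih => exact ih _ (pairStep_shape xs n m p hsh)

theorem mget_foldPairs (xs : List Int) (n : Nat) (ps : List (Nat × Nat)) (m : List (List Int))
    (hsh : matShape n m) (hps : ∀ p ∈ ps, p.1 < n ∧ p.2 < n) (i j : Nat) :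
    mget (ps.foldl (pairStep xs) m) i j =
      if ∃ p ∈ ps, Int.gcd (xs.getD p.1 0) (xs.getD p.2 0) = 1 ∧
          ((p.1 = i ∧ p.2 = j) ∨ (p.1 = j ∧ p.2 = i)) then 1 else mget m i j := by
  induction ps generalizing m with
  | nil => simp
  | cons p t ih =>
    obtain ⟨a, b⟩ := p
    obtain ⟨hpa, hpb⟩ := hps (a, b) List.mem_cons_self
    have hps' : ∀ p ∈ t, p.1 < n ∧ p.2 < n := fun q hq => hps q (List.mem_cons_of_mem _ hq)
    rw [List.foldl_cons, ih _ (pairStep_shape xs n m _ hsh) hps']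
    by_cases hg : Int.gcd (xs.getD a 0) (xs.getD b 0) = 1
    · have hstep : mget (pairStep xs m (a, b)) i j =
          if (a = i ∧ b = j) ∨ (a = j ∧ b = i) then 1 else mget m i j := by
        rw [pairStep, if_pos hg,
          mget_set2 n _ b a 1 (set2_shape n _ _ _ _ hsh) hpb hpa,
          mget_set2 n _ a b 1 hsh hpa hpb]
        by_cases h1 : i = b ∧ j = a
        · have hx : (a = i ∧ b = j) ∨ (a = j ∧ b = i) := Or.inr ⟨h1.2.symm, h1.1.symm⟩
          rw [if_pos h1, if_pos hx]
        · rw [if_neg h1]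
          by_cases h2 : i = a ∧ j = b
          · have hx : (a = i ∧ b = j) ∨ (a = j ∧ b = i) := Or.inl ⟨h2.1.symm, h2.2.symm⟩
            rw [if_pos h2, if_pos hx]
          · rw [if_neg h2, if_neg]
            rintro (⟨rfl, rfl⟩ | ⟨rfl, rfl⟩)
            · exact h2 ⟨rfl, rfl⟩
            · exact h1 ⟨rfl, rfl⟩
      rw [hstep]
      by_cases ht : ∃ q ∈ t, Int.gcd (xs.getD q.1 0) (xs.getD q.2 0) = 1 ∧
          ((q.1 = i ∧ q.2 = j) ∨ (q.1 = j ∧ q.2 = i))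
      · rw [if_pos ht, if_pos]
        obtain ⟨q, hq, hc⟩ := ht
        exact ⟨q, List.mem_cons_of_mem _ hq, hc⟩
      · rw [if_neg ht]
        by_cases hpos : (a = i ∧ b = j) ∨ (a = j ∧ b = i)
        · rw [if_pos hpos, if_pos ⟨(a, b), List.mem_cons_self, hg, hpos⟩]
        · rw [if_neg hpos, if_neg]
          rintro ⟨q, hq, hc⟩
          rcases List.mem_cons.mp hq with rfl | hq'
          · exact hpos hc.2
          · exact ht ⟨q, hq', hc⟩
    · have hstep : pairStep xs m (a, b) = m := by rw [pairStep, if_neg hg]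
      rw [hstep]
      congr 1
      simp only [eq_iff_iff]
      constructor
      · rintro ⟨q, hq, hc⟩; exact ⟨q, List.mem_cons_of_mem _ hq, hc⟩
      · rintro ⟨q, hq, hc⟩
        rcases List.mem_cons.mp hq with rfl | hq'
        · exact absurd hc.1 hg
        · exact ⟨q, hq', hc⟩

theorem mget_replicate (n i j : Nat) : mget (List.replicate n (List.replicate n (0:Int))) i j = 0 := by
  simp only [mget, List.getD_eq_getElem?_getD, List.getElem?_replicate]
  split_ifs <;> simp [List.getElem?_replicate] <;> split_ifs <;> simp

theorem mget_buildA (xs : List Int) (n : Nat) (i j : Nat) :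
    mget (buildA xs n) i j =
      if i < n ∧ j < n ∧ i ≠ j ∧ Int.gcd (xs.getD i 0) (xs.getD j 0) = 1 then 1 else 0 := by
  have hsh : matShape n (List.replicate n (List.replicate n (0:Int))) := by
    refine ⟨List.length_replicate, ?_⟩
    intro r hr
    rw [List.eq_of_mem_replicate hr]
    exact List.length_replicate
  rw [buildA_eq_foldPairs,
    mget_foldPairs xs n _ _ hsh (fun p hp => by
      have := (mem_pairsN n p).mp hp; omega) i j,
    mget_replicate]
  congr 1
  simp only [eq_iff_iff]
  constructor
  · rintro ⟨⟨a, b⟩, hp, hg, (⟨rfl, rfl⟩ | ⟨rfl, rfl⟩)⟩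
    · have := (mem_pairsN n (a, b)).mp hp
      exact ⟨by omega, by omega, by omega, hg⟩
    · have := (mem_pairsN n (a, b)).mp hp
      exact ⟨by omega, by omega, by omega, by rw [Int.gcd_comm]; exact hg⟩
  · rintro ⟨hi, hj, hne, hg⟩
    rcases Nat.lt_or_ge i j with hlt | hge
    · exact ⟨(i, j), (mem_pairsN n (i, j)).mpr (by omega), hg, Or.inl ⟨rfl, rfl⟩⟩
    · exact ⟨(j, i), (mem_pairsN n (j, i)).mpr (by omega),
        by rw [Int.gcd_comm]; exact hg, Or.inr ⟨rfl, rfl⟩⟩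

theorem mget_adjB (xs : List Int) (n : Nat) (i j : Nat) :
    mget (adjB xs n) i j =
      if i < n ∧ j < n ∧ i ≠ j ∧ Int.gcd (xs.getD i 0) (xs.getD j 0) = 1 then 1 else 0 := by
  by_cases hi : i < n
  · by_cases hj : j < n
    · simp [mget, adjB, List.getD_eq_getElem?_getD, hi, hj]
    · simp [mget, adjB, List.getD_eq_getElem?_getD, hi, hj]
  · simp [mget, adjB, List.getD_eq_getElem?_getD, hi]

theorem buildA_shape (xs : List Int) (n : Nat) : matShape n (buildA xs n) := by
  rw [buildA_eq_foldPairs]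
  refine foldPairs_shape xs n _ _ ⟨List.length_replicate, ?_⟩
  intro r hr
  rw [List.eq_of_mem_replicate hr]
  exact List.length_replicate

theorem adjB_shape (xs : List Int) (n : Nat) : matShape n (adjB xs n) := by
  refine ⟨by simp [adjB], ?_⟩
  intro r hr
  simp only [adjB, List.mem_map] at hr
  obtain ⟨i, _, rfl⟩ := hr
  simp

theorem buildA_eq_adjB (xs : List Int) (n : Nat) : buildA xs n = adjB xs n := by
  obtain ⟨hAl, hAr⟩ := buildA_shape xs n
  obtain ⟨hBl, hBr⟩ := adjB_shape xs n
  apply List.ext_getElem (by rw [hAl, hBl])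
  intro i hi hi'
  apply List.ext_getElem
  · rw [hAr _ (List.getElem_mem hi), hBr _ (List.getElem_mem hi')]
  intro j hj hj'
  have hmA : mget (buildA xs n) i j = (buildA xs n)[i][j] := by
    rw [mget, List.getD_eq_getElem _ _ hi, List.getD_eq_getElem _ _ hj]
  have hmB : mget (adjB xs n) i j = (adjB xs n)[i][j] := by
    rw [mget, List.getD_eq_getElem _ _ hi', List.getD_eq_getElem _ _ hj']
  rw [← hmA, ← hmB, mget_buildA, mget_adjB]

theorem mem_here (adj : List (List Int)) (start cur : Nat) (depth : Nat) (x : Int) :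
    x ∈ (if 3 ≤ depth ∧ depth % 2 = 1 ∧ mget adj cur start == 1 then [(depth : Int)] else []) ↔
      (3 ≤ depth ∧ depth % 2 = 1 ∧ mget adj cur start == 1) ∧ x = (depth : Int) := by
  split_ifs with h
  · simp [h]
  · constructor
    · intro hx; simp at hx
    · rintro ⟨hc, rfl⟩; exact absurd hc h

theorem collect_bounds_fuel : ∀ (k : Nat) (adj : List (List Int)) (n start cur : Nat)
    (vis : List Bool) (depth : Nat) (bound : Int), (bound - (depth : Int)).toNat ≤ k →
    ∀ x ∈ collectB adj n start cur vis depth bound,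
      3 ≤ x ∧ x % 2 = 1 ∧ (depth : Int) ≤ x ∧ x ≤ max (depth : Int) bound := by
  intro k
  induction k with
  | zero =>
    intro adj n start cur vis depth bound hk x hx
    have hlt : ¬ ((depth : Int) < bound) := by omega
    rw [collectB.eq_def] at hx
    simp only [if_neg hlt] at hx
    obtain ⟨⟨h3, hodd, _⟩, rfl⟩ := (mem_here adj start cur depth x).mp hx
    refine ⟨by omega, by omega, by omega, by omega⟩
  | succ k ih =>
    intro adj n start cur vis depth bound hk x hx
    rw [collectB.eq_def] at hx
    by_cases hlt : (depth : Int) < bound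
    · simp only [if_pos hlt] at hx
      rcases List.mem_append.mp hx with h1 | h2
      · obtain ⟨⟨h3, hodd, _⟩, rfl⟩ := (mem_here adj start cur depth x).mp h1
        refine ⟨by omega, by omega, by omega, by omega⟩
      · obtain ⟨v, _, hv⟩ := List.mem_flatMap.mp h2
        have hin : x ∈ collectB adj n start v (vis.set v true) (depth+1) bound := by
          by_cases hc : mget adj cur v == 1 && !(vis.getD v false)
          · rwa [if_pos hc] at hv
          · rw [if_neg hc] at hv; simp at hv
        have := ih adj n start v (vis.set v true) (depth+1) bound (by omega) x hin
        push_cast at this ⊢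
        refine ⟨this.1, this.2.1, by omega, by omega⟩
    · simp only [if_neg hlt] at hx
      obtain ⟨⟨h3, hodd, _⟩, rfl⟩ := (mem_here adj start cur depth x).mp hx
      refine ⟨by omega, by omega, by omega, by omega⟩

theorem collect_bounds (adj : List (List Int)) (n start cur : Nat) (vis : List Bool)
    (depth : Nat) (bound : Int) :
    ∀ x ∈ collectB adj n start cur vis depth bound,
      3 ≤ x ∧ x % 2 = 1 ∧ (depth : Int) ≤ x ∧ x ≤ max (depth : Int) bound :=
  collect_bounds_fuel (bound - (depth : Int)).toNat adj n start cur vis depth bound le_rfl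

theorem collect_mem_iff_dfs (adj : List (List Int)) (n start target : Nat) (bound : Int)
    (h3 : 3 ≤ target) (hodd : target % 2 = 1) (hb : (target : Int) ≤ bound) :
    ∀ k cur vis depth, depth + k = target →
      ((target : Int) ∈ collectB adj n start cur vis depth bound ↔
        dfsA adj n start cur vis depth target = true) := by
  intro k
  induction k with
  | zero =>
    intro cur vis depth hdep
    have hd : depth = target := by omega
    subst hd
    rw [dfsA.eq_def, if_pos rfl, collectB.eq_def]
    constructor
    · intro hx
      by_cases hlt : (depth : Int) < bound
      · rw [if_pos hlt] at hx
        rcases List.mem_append.mp hx with h1 | h2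
        · exact ((mem_here adj start cur depth _).mp h1).1.2.2
        · obtain ⟨v, _, hv⟩ := List.mem_flatMap.mp h2
          have hin : (depth:Int) ∈ collectB adj n start v (vis.set v true) (depth+1) bound := by
            by_cases hc : mget adj cur v == 1 && !(vis.getD v false)
            · rwa [if_pos hc] at hv
            · rw [if_neg hc] at hv; simp at hv
          have := (collect_bounds adj n start v (vis.set v true) (depth+1) bound _ hin).2.2.1
          omega
      · rw [if_neg hlt] at hx
        exact ((mem_here adj start cur depth _).mp hx).1.2.2
    · intro hadj
      have hcond : 3 ≤ depth ∧ depth % 2 = 1 ∧ (mget adj cur start == 1) = true :=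
        ⟨h3, hodd, hadj⟩
      simp only [if_pos hcond]
      split_ifs
      all_goals simp
  | succ k ih =>
    intro cur vis depth hdep
    have hne : depth ≠ target := by omega
    have hngt : ¬ (target < depth) := by omega
    have hlt : (depth : Int) < bound := by omega
    rw [dfsA.eq_def, if_neg hne, if_neg hngt, collectB.eq_def, if_pos hlt]
    rw [List.any_eq_true]
    constructor
    · intro hx
      rcases List.mem_append.mp hx with h1 | h2
      · have := ((mem_here adj start cur depth _).mp h1).2
        omega
      · obtain ⟨v, hvr, hv⟩ := List.mem_flatMap.mp h2
        by_cases hc : mget adj cur v == 1 && !(vis.getD v false)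
        · rw [if_pos hc] at hv
          refine ⟨v, hvr, ?_⟩
          rw [if_pos hc]
          exact (ih v (vis.set v true) (depth+1) (by omega)).mp hv
        · rw [if_neg hc] at hv; simp at hv
    · rintro ⟨v, hvr, hv⟩
      by_cases hc : mget adj cur v == 1 && !(vis.getD v false)
      · rw [if_pos hc] at hv
        refine List.mem_append.mpr (Or.inr (List.mem_flatMap.mpr ⟨v, hvr, ?_⟩))
        rw [if_pos hc]
        exact (ih v (vis.set v true) (depth+1) (by omega)).mpr hv
      · rw [if_neg hc] at hv; simp at hv

theorem flat_mem_iff_hasCycle (adj : List (List Int)) (n : Nat) (bound : Int) (l : Nat)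
    (h3 : 3 ≤ l) (hodd : l % 2 = 1) (hb : (l : Int) ≤ bound) (hn : bound ≤ (n : Int)) :
    ((l : Int) ∈ (List.range n).flatMap (fun s =>
        collectB adj n s s ((List.replicate n false).set s true) 1 bound) ↔
      hasCycleA adj n l = true) := by
  rw [hasCycleA, if_neg (by omega : ¬ n < l), List.any_eq_true, List.mem_flatMap]
  constructor
  · rintro ⟨s, hs, hmem⟩
    exact ⟨s, hs, (collect_mem_iff_dfs adj n s l bound h3 hodd hb (l-1) s _ 1 (by omega)).mp hmem⟩
  · rintro ⟨s, hs, hdfs⟩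
    exact ⟨s, hs, (collect_mem_iff_dfs adj n s l bound h3 hodd hb (l-1) s _ 1 (by omega)).mpr hdfs⟩

-- ===== VERDICT (by name: the statement is the Claim_ definition above) =====
theorem pairwise_lt_pyRange32 (M : Int) : (PySem.List.pyRange 3 M 2).Pairwise (· < ·) := by
  rw [PySem.List.pyRange_of_pos _ _ (by norm_num : (0:Int) < 2)]
  exact List.pairwise_map.mpr (List.pairwise_lt_range.imp (by intro a b h; omega))

theorem cycle_spectrum_via_matrix_spec : Claim_equal_cycle_spectrum_via_matrix := by
  intro A max_length _hdom
  unfold Spec_cycle_spectrum_via_matrix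
  simp only [cycle_spectrum_via_matrix, cycle_spectrum_via_matrix_alt]
  rw [buildA_eq_adjB]
  set xs := PySem.List.sorted A (fun x => x) with hxs
  set n := xs.length with hn
  set bound := min max_length (n : Int) with hbound
  set adj := adjB xs n with hadj
  set flat := (List.range n).flatMap (fun s =>
    collectB adj n s s ((List.replicate n false).set s true) 1 bound) with hflatdef
  by_cases hsmall : n < 3
  · rw [if_pos hsmall]
    have hflat : flat = [] := by
      rw [List.eq_nil_iff_forall_not_mem]
      intro x hx
      obtain ⟨s, _, hmem⟩ := List.mem_flatMap.mp hx
      have h := collect_bounds adj n s s _ 1 bound x hmem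
      have : bound ≤ (n : Int) := by omega
      omega
    rw [hflat]
    simp [PySem.List.sorted_eq_nil_iff]
  · rw [if_neg hsmall]
    rw [PySem.List.foldl_append_if_eq_filter (fun len : Int => hasCycleA adj n len.toNat)]
    rw [List.nil_append]
    have hM : min (max_length + 1) ((n : Int) + 1) = bound + 1 := by omega
    rw [hM]
    have hbn : bound ≤ (n : Int) := by omega
    have hpair : ((PySem.List.pyRange 3 (bound + 1) 2).filter
        (fun len => hasCycleA adj n len.toNat)).Pairwise (· < ·) :=
      (pairwise_lt_pyRange32 (bound + 1)).filter _
    have hmemiff : ∀ a : Int, a ∈ (PySem.List.pyRange 3 (bound + 1) 2).filter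
        (fun len => hasCycleA adj n len.toNat) ↔ a ∈ PySem.Set.ofList flat := by
      intro a
      rw [List.mem_filter, PySem.Set.mem_ofList,
        PySem.List.mem_pyRange_iff_of_pos (by norm_num : (0:Int) < 2)]
      constructor
      · rintro ⟨⟨h3, hlt, hdvd⟩, hcyc⟩
        have hcast : ((a.toNat : Int)) = a := by omega
        have := (flat_mem_iff_hasCycle adj n bound a.toNat (by omega)
          (by omega) (by omega) hbn).mpr hcyc
        rwa [hcast] at this
      · intro hmem
        obtain ⟨s, _, hmem'⟩ := List.mem_flatMap.mp hmem
        have hb := collect_bounds adj n s s _ 1 bound a hmem'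
        have hab : a ≤ bound := by omega
        have hcast : ((a.toNat : Int)) = a := by omega
        have hcyc := (flat_mem_iff_hasCycle adj n bound a.toNat (by omega)
          (by omega) (by omega) hbn).mp (by rwa [hcast])
        exact ⟨⟨by omega, by omega, by omega⟩, hcyc⟩
    have hperm : ((PySem.List.pyRange 3 (bound + 1) 2).filter
        (fun len => hasCycleA adj n len.toNat)).Perm (PySem.Set.ofList flat) :=
      (List.perm_ext_iff_of_nodup (hpair.imp ne_of_lt) (PySem.Set.nodup_ofList flat)).mpr hmemiff
    exact (PySem.List.sorted_eq_of_perm_of_pairwise_lt _ _ _ hperm hpair).symm
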